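-- pv_equiv track=rewrite | github.com/stancesa/stock_screening_analysis | src/scanner.py | _parse_list_lines
-- ===== SOURCE A (Python) =====
-- from typing import Optional, Dict, Any, Iterable, List, Union
--
-- def _parse_list_lines(lines: Iterable[str]) -> List[str]:
--     """
--     Parse lines into items:
--       - trims whitespace
--       - removes full-line comments (# ... )
--       - removes inline comments (e.g. AAPL  # watchlist)
--       - skips empty lines
--       - preserves order while dropping duplicates
--     """
--     items = []
--     seen = set()
--     for raw in lines:
--         line = raw.strip()
--         if not line:
--             continue
--         if line.startswith("#"):
--             continue
--         # strip inline comments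
--         if "#" in line:
--             line = line.split("#", 1)[0].strip()
--         if not line:
--             continue
--         # optional: allow comma-separated on a single line
--         for tok in [t.strip() for t in line.split(",")]:
--             if not tok:
--                 continue
--             # normalize tickers (optional): upper-case
--             tok_norm = tok.upper()
--             if tok_norm not in seen:
--                 seen.add(tok_norm)
--                 items.append(tok_norm)
--     return items
-- ===== SOURCE B (Python) =====
-- from typing import Iterable, List
--
-- def _parse_list_lines(lines: Iterable[str]) -> List[str]:
--     # Single character-level scan per line (state machine), instead of a
--     # strip/startswith/split pipeline; order-preserving dedup as a final step.
--     tokens: List[str] = []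
--     for raw in lines:
--         buf: List[str] = []   # current token: already trimmed and upper-cased
--         pend: List[str] = []  # whitespace run after buf, committed only if more token chars follow
--         for ch in raw:
--             if ch == '#':     # comment: rest of line ignored
--                 break
--             if ch == ',':     # token boundary
--                 if buf:
--                     tokens.append(''.join(buf))
--                 buf = []
--                 pend = []
--             elif ch.isspace():
--                 if buf:
--                     pend.append(ch)
--             else:
--                 buf.extend(pend)
--                 pend = []
--                 buf.append(ch.upper())
--         if buf:
--             tokens.append(''.join(buf))
--     return list(dict.fromkeys(tokens))
-- ===== Notes on version B (the rewrite author's own statement) =====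
-- stated objective: alternative
-- what changed: A's strip/startswith/split string-method pipeline with an interleaved seen-set dedup is replaced by a single character-level state machine per line (buf/pend token builder that trims, upper-cases and splits at ',' and '#' in one scan, with no string methods), followed by one order-preserving dedup pass.
import Mathlib
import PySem

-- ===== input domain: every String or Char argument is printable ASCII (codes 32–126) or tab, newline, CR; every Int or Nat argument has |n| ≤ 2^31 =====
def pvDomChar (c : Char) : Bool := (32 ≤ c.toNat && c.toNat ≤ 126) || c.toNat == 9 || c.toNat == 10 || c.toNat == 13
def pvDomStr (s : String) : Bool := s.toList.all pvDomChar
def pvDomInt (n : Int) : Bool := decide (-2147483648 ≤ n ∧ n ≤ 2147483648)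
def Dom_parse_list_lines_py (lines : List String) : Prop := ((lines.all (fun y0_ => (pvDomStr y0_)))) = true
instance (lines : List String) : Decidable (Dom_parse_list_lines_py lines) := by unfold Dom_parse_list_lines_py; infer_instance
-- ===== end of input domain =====

-- B replaces A's strip/startswith/split string-method pipeline with a single
-- character-level state machine per line (buf/pend token builder), with one
-- order-preserving dedup at the end (objective: alternative).

-- ===== PORT A =====
-- body of A's inner 'for tok in [t.strip() for t in line.split(",")]' loop
def pvTokStepA (st : List String × PySem.Set String) (tok : String) :
    List String × PySem.Set String :=
  if tok = "" then st
  else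
    let tok_norm := PySem.Str.upper tok
    if PySem.Set.contains st.2 tok_norm then st
    else (st.1 ++ [tok_norm], PySem.Set.add st.2 tok_norm)

-- body of A's outer 'for raw in lines' loop
def pvLineStepA (st : List String × PySem.Set String) (raw : String) :
    List String × PySem.Set String :=
  let line := PySem.Str.strip raw
  if line = "" then st
  else if PySem.Str.startswith line "#" then st
  else
    let line :=
      if PySem.Str.isIn "#" line then
        PySem.Str.strip (((PySem.Str.splitMax? line "#" 1).getD []).headD "")
      else line
    if line = "" then st
    else (((PySem.Str.split? line ",").getD []).map PySem.Str.strip).foldl pvTokStepA st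

def parse_list_lines_py (lines : List String) : List String :=
  (lines.foldl pvLineStepA ([], PySem.Set.empty)).1

-- ===== PORT B =====
-- the inner 'for ch in raw' loop of Source B: buf = current token (trimmed,
-- upper-cased), pend = whitespace run after buf; flush on ',', '#' and line end
def pvScanB : List Char → List Char → List Char → List String → List String
  | [], buf, _, toks => if buf = [] then toks else toks ++ [String.ofList buf]
  | c :: rest, buf, pend, toks =>
    if c = '#' then (if buf = [] then toks else toks ++ [String.ofList buf])
    else if c = ',' then pvScanB rest [] [] (if buf = [] then toks else toks ++ [String.ofList buf])
    else if PySem.Chars.isspace c then pvScanB rest buf (if buf = [] then pend else pend ++ [c]) toks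
    else pvScanB rest (buf ++ pend ++ [PySem.Chars.upperChar c]) [] toks

def parse_list_lines_py_alt (lines : List String) : List String :=
  PySem.List.dedup (lines.foldl (fun toks raw => pvScanB raw.toList [] [] toks) [])

-- ===== PRECONDITION & SPEC =====
def Spec_parse_list_lines_py (lines : List String) (out : List String) : Prop := out = parse_list_lines_py_alt lines
instance (lines : List String) (out : List String) : Decidable (Spec_parse_list_lines_py lines out) := by unfold Spec_parse_list_lines_py; infer_instance

-- ===== CLAIM (what is proved, stated in full; the proofs are below) =====
def Claim_equal_parse_list_lines_py : Prop := ∀ (lines : List String), Dom_parse_list_lines_py lines → Spec_parse_list_lines_py lines (parse_list_lines_py lines)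

-- ===== LEMMAS AND PROOFS =====

-- ---- proof-side canonical form: comma pieces of the '#'-cut line, each stripped+uppercased, empties dropped ----

def pvSplitC (pre : List Char) : List Char → List (List Char)
  | [] => [pre]
  | c :: rest => if c = ',' then pre :: pvSplitC [] rest else pvSplitC (pre ++ [c]) rest

def pvF (p : List Char) : List Char := PySem.Chars.upper (PySem.Chars.strip p)

def pvT' (pieces : List (List Char)) : List String :=
  ((pieces.map pvF).filter (· ≠ [])).map String.ofList

def pvT (s : List Char) : List String := pvT' (pvSplitC [] s)

def pvCanon (raw : String) : List String := pvT (raw.toList.takeWhile (· ≠ '#'))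

-- ---- whitespace-character basics ----

theorem pv_ws_ne_hash {c : Char} (h : PySem.Chars.isspace c = true) : c ≠ '#' := by
  intro hc; subst hc; simp [PySem.Chars.isspace] at h

theorem pv_ws_ne_comma {c : Char} (h : PySem.Chars.isspace c = true) : c ≠ ',' := by
  intro hc; subst hc; simp [PySem.Chars.isspace] at h

theorem pv_upperChar_ws {c : Char} (h : PySem.Chars.isspace c = true) :
    PySem.Chars.upperChar c = c := by
  simp only [PySem.Chars.upperChar, PySem.Chars.islower]
  have hn : ¬ ('a' ≤ c ∧ c ≤ 'z') := by
    simp only [PySem.Chars.isspace] at h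
    rintro ⟨h1, h2⟩
    rw [Char.le_def] at h1 h2
    simp only [Bool.or_eq_true, Bool.and_eq_true, decide_eq_true_eq] at h
    have e1 : ('a' : Char).val = 97 := rfl
    have e2 : ('z' : Char).val = 122 := rfl
    rw [e1] at h1; rw [e2] at h2
    have h1' : 97 ≤ c.toNat := by exact_mod_cast UInt32.le_iff_toNat_le.mp h1
    have h2' : c.toNat ≤ 122 := by exact_mod_cast UInt32.le_iff_toNat_le.mp h2
    omega
  simp [hn]

theorem pv_upper_ws {w : List Char} (h : w.all PySem.Chars.isspace) :
    PySem.Chars.upper w = w := by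
  simp only [PySem.Chars.upper]
  rw [List.all_eq_true] at h
  induction w with
  | nil => rfl
  | cons c cs ih => simp [pv_upperChar_ws (h c (by simp)), ih (fun x hx => h x (by simp [hx]))]

-- ---- lstrip / rstrip / strip structure ----

theorem pv_lstrip_ws_append {w : List Char} (hw : w.all PySem.Chars.isspace) (x : List Char) :
    PySem.Chars.lstrip (w ++ x) = PySem.Chars.lstrip x := by
  simp only [PySem.Chars.lstrip, List.dropWhile_append]
  rw [List.all_eq_true] at hw
  rw [List.dropWhile_eq_nil_iff.mpr hw]
  simp

theorem pv_rstrip_append_ws {w : List Char} (hw : w.all PySem.Chars.isspace) (x : List Char) :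
    PySem.Chars.rstrip (x ++ w) = PySem.Chars.rstrip x := by
  simp only [PySem.Chars.rstrip, List.reverse_append, List.dropWhile_append]
  rw [List.all_eq_true] at hw
  rw [List.dropWhile_eq_nil_iff.mpr (by intro y hy; exact hw y (List.mem_reverse.mp hy))]
  simp

theorem pv_strip_append_ws {w : List Char} (hw : w.all PySem.Chars.isspace) (x : List Char) :
    PySem.Chars.strip (x ++ w) = PySem.Chars.strip x := by
  simp only [PySem.Chars.strip]
  by_cases hx : PySem.Chars.lstrip x = []
  · have hxw : x.all PySem.Chars.isspace := by
      rw [List.all_eq_true]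
      exact fun y hy => List.dropWhile_eq_nil_iff.mp hx y hy
    rw [show PySem.Chars.lstrip (x ++ w) = PySem.Chars.lstrip w from pv_lstrip_ws_append hxw w,
        hx]
    rw [show PySem.Chars.lstrip w = [] from
      List.dropWhile_eq_nil_iff.mpr (List.all_eq_true.mp hw)]
  · have : PySem.Chars.lstrip (x ++ w) = PySem.Chars.lstrip x ++ w := by
      simp only [PySem.Chars.lstrip, List.dropWhile_append]
      simp [PySem.Chars.lstrip] at hx
      simp [List.isEmpty_iff, hx]
    rw [this, pv_rstrip_append_ws hw]

theorem pv_strip_ws_append {w : List Char} (hw : w.all PySem.Chars.isspace) (x : List Char) :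
    PySem.Chars.strip (w ++ x) = PySem.Chars.strip x := by
  simp only [PySem.Chars.strip, pv_lstrip_ws_append hw]

theorem pv_strip_ws {w : List Char} (hw : w.all PySem.Chars.isspace) :
    PySem.Chars.strip w = [] := by
  have := pv_strip_ws_append hw ([] : List Char)
  simpa using this

theorem pv_dropWhile_head {p : Char → Bool} {l : List Char} {c : Char} {u : List Char}
    (h : l.dropWhile p = c :: u) : p c = false := by
  induction l with
  | nil => simp at h
  | cons a t ih =>
    by_cases hp : p a
    · exact ih (by simpa [List.dropWhile, hp] using h)
    · simp [List.dropWhile, hp] at h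
      simpa [← h.1] using hp

-- decomposition t = w1 ++ strip t ++ w2 with w1, w2 whitespace, strip t irreducible
theorem pv_dropWhile_dropWhile (p : Char → Bool) (l : List Char) :
    List.dropWhile p (List.dropWhile p l) = List.dropWhile p l := by
  cases h : l.dropWhile p with
  | nil => simp
  | cons c u =>
    exact List.dropWhile_cons_of_neg (by simp [pv_dropWhile_head h])

theorem pv_rstrip_decomp (x : List Char) :
    x = PySem.Chars.rstrip x ++ (x.reverse.takeWhile PySem.Chars.isspace).reverse := by
  conv_lhs => rw [← List.reverse_reverse x,
    ← List.takeWhile_append_dropWhile (p := PySem.Chars.isspace) (l := x.reverse)]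
  rw [List.reverse_append]
  simp [PySem.Chars.rstrip]

theorem pv_decomp (t : List Char) :
    ∃ w1 w2, t = w1 ++ PySem.Chars.strip t ++ w2 ∧ w1.all PySem.Chars.isspace ∧
      w2.all PySem.Chars.isspace ∧ PySem.Chars.lstrip (PySem.Chars.strip t) = PySem.Chars.strip t ∧
      PySem.Chars.rstrip (PySem.Chars.strip t) = PySem.Chars.strip t := by
  refine ⟨t.takeWhile PySem.Chars.isspace,
    ((PySem.Chars.lstrip t).reverse.takeWhile PySem.Chars.isspace).reverse, ?_, ?_, ?_, ?_, ?_⟩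
  · conv_lhs => rw [← List.takeWhile_append_dropWhile (p := PySem.Chars.isspace) (l := t)]
    rw [List.append_assoc]
    congr 1
    exact pv_rstrip_decomp (PySem.Chars.lstrip t)
  · rw [List.all_eq_true]; exact fun x hx => List.mem_takeWhile_imp hx
  · rw [List.all_eq_true]; intro x hx
    exact List.mem_takeWhile_imp (List.mem_reverse.mp hx)
  · cases h : PySem.Chars.strip t with
    | nil => simp [PySem.Chars.lstrip]
    | cons c u =>
      have h2 := pv_rstrip_decomp (PySem.Chars.lstrip t)
      rw [show PySem.Chars.rstrip (PySem.Chars.lstrip t) = PySem.Chars.strip t from rfl, h] at h2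
      have hc : PySem.Chars.isspace c = false :=
        pv_dropWhile_head (p := PySem.Chars.isspace) (l := t) (c := c)
          (u := u ++ ((PySem.Chars.lstrip t).reverse.takeWhile PySem.Chars.isspace).reverse) h2
      rw [← h]
      show List.dropWhile _ _ = _
      rw [h, List.dropWhile_cons_of_neg (by simp [hc])]
  · show PySem.Chars.rstrip (PySem.Chars.rstrip (PySem.Chars.lstrip t)) = _
    simp only [PySem.Chars.rstrip, List.reverse_reverse]
    rw [pv_dropWhile_dropWhile]
    rfl

theorem pv_mem_hash_strip (t : List Char) : '#' ∈ PySem.Chars.strip t ↔ '#' ∈ t := by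
  obtain ⟨w1, w2, hd, hw1, hw2, -, -⟩ := pv_decomp t
  rw [List.all_eq_true] at hw1 hw2
  constructor
  · intro h; rw [hd]; simp [h]
  · intro h
    conv at h => rw [hd]
    simp only [List.mem_append] at h
    rcases h with (h | h) | h
    · have := hw1 _ h; simp [PySem.Chars.isspace] at this
    · exact h
    · have := hw2 _ h; simp [PySem.Chars.isspace] at this

-- ---- pvSplitC facts ----

theorem pv_splitC_no_comma {l : List Char} (h : ∀ c ∈ l, c ≠ ',') (pre : List Char) :
    pvSplitC pre l = [pre ++ l] := by
  induction l generalizing pre with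
  | nil => simp [pvSplitC]
  | cons c rest ih =>
    have hc : c ≠ ',' := h c (by simp)
    simp [pvSplitC, hc, ih (fun d hd => h d (by simp [hd]))]

theorem pv_splitC_ws_append {w : List Char} (hw : w.all PySem.Chars.isspace)
    (pre d : List Char) : pvSplitC pre (w ++ d) = pvSplitC (pre ++ w) d := by
  induction w generalizing pre with
  | nil => simp
  | cons c cs ih =>
    have hc : PySem.Chars.isspace c = true := by simp [List.all_cons] at hw; exact hw.1
    have hcs : cs.all PySem.Chars.isspace := by simp [List.all_cons] at hw; simpa using hw.2
    simp [pvSplitC, pv_ws_ne_comma hc, ih hcs (pre ++ [c])]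

theorem pv_splitC_comma (pre rest : List Char) :
    pvSplitC pre (',' :: rest) = pre :: pvSplitC [] rest := by
  simp [pvSplitC]

theorem pv_splitC_other {c : Char} (hc : c ≠ ',') (pre rest : List Char) :
    pvSplitC pre (c :: rest) = pvSplitC (pre ++ [c]) rest := by
  simp [pvSplitC, hc]

theorem pv_map_f_splitC_ws_pre {w : List Char} (hw : w.all PySem.Chars.isspace)
    (pre d : List Char) :
    (pvSplitC (w ++ pre) d).map pvF = (pvSplitC pre d).map pvF := by
  induction d generalizing pre with
  | nil =>
    simp only [pvSplitC, List.map_cons, List.map_nil]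
    congr 1
    simp only [pvF]
    rw [pv_strip_ws_append hw]
  | cons c rest ih =>
    by_cases hc : c = ','
    · subst hc
      rw [pv_splitC_comma, pv_splitC_comma, List.map_cons, List.map_cons]
      congr 1
      simp only [pvF]
      rw [pv_strip_ws_append hw]
    · rw [pv_splitC_other hc, pv_splitC_other hc, List.append_assoc]
      exact ih (pre ++ [c])

theorem pv_map_f_splitC_append_ws {w : List Char} (hw : w.all PySem.Chars.isspace)
    (pre d : List Char) :
    (pvSplitC pre (d ++ w)).map pvF = (pvSplitC pre d).map pvF := by
  induction d generalizing pre with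
  | nil =>
    simp only [List.nil_append]
    rw [pv_splitC_no_comma (fun c hc => pv_ws_ne_comma (List.all_eq_true.mp hw c hc)) pre,
        pvSplitC]
    simp only [List.map_cons, List.map_nil]
    congr 1
    simp only [pvF]
    rw [pv_strip_append_ws hw]
  | cons c rest ih =>
    by_cases hc : c = ','
    · subst hc
      rw [List.cons_append, pv_splitC_comma, pv_splitC_comma, List.map_cons, List.map_cons, ih]
    · rw [List.cons_append, pv_splitC_other hc, pv_splitC_other hc]
      exact ih (pre ++ [c])

theorem pv_T_ws_append {w : List Char} (hw : w.all PySem.Chars.isspace) (s : List Char) :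
    pvT (w ++ s) = pvT s := by
  simp only [pvT, pvT']
  rw [pv_splitC_ws_append hw [] s, List.nil_append,
      show (w : List Char) = w ++ [] from (List.append_nil w).symm,
      pv_map_f_splitC_ws_pre hw [] s]

theorem pv_T_append_ws {w : List Char} (hw : w.all PySem.Chars.isspace) (s : List Char) :
    pvT (s ++ w) = pvT s := by
  simp only [pvT, pvT']
  rw [pv_map_f_splitC_append_ws hw [] s]

theorem pv_T_strip (t : List Char) : pvT (PySem.Chars.strip t) = pvT t := by
  obtain ⟨w1, w2, hd, hw1, hw2, -, -⟩ := pv_decomp t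
  conv_rhs => rw [hd]
  rw [List.append_assoc, pv_T_ws_append hw1, pv_T_append_ws hw2]

theorem pv_splitOn_go_comma (fuel : Nat) :
    ∀ (l cur : List Char) (acc : List (List Char)), l.length < fuel →
      PySem.Chars.splitOn.go [','] fuel l cur acc = acc.reverse ++ pvSplitC cur.reverse l := by
  induction fuel with
  | zero => intro l cur acc h; omega
  | succ n ih =>
    intro l cur acc h
    cases l with
    | nil => simp [PySem.Chars.splitOn.go, pvSplitC]
    | cons c rest =>
      by_cases hc : c = ','
      · subst hc
        rw [show PySem.Chars.splitOn.go [','] (n+1) (','::rest) cur acc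
            = PySem.Chars.splitOn.go [','] n (List.drop 1 (','::rest)) [] (cur.reverse :: acc) from by
          simp [PySem.Chars.splitOn.go, List.isPrefixOf]]
        rw [ih _ _ _ (by simpa using Nat.lt_of_succ_lt_succ h)]
        simp [pvSplitC]
      · rw [show PySem.Chars.splitOn.go [','] (n+1) (c::rest) cur acc
            = PySem.Chars.splitOn.go [','] n rest (c :: cur) acc from by
          have : ([','].isPrefixOf (c :: rest)) = false := by
            simp [List.isPrefixOf, Ne.symm hc]
          simp [PySem.Chars.splitOn.go, this]]
        rw [ih _ _ _ (by simpa using Nat.lt_of_succ_lt_succ h)]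
        simp [pvSplitC, hc]

theorem pv_splitOn_comma (s : List Char) : PySem.Chars.splitOn s [','] = pvSplitC [] s := by
  rw [PySem.Chars.splitOn, pv_splitOn_go_comma _ _ _ _ (by omega)]
  simp

def pvRest (l : List Char) : List (List Char) :=
  if '#' ∈ l then [(l.dropWhile (· ≠ '#')).tail] else []

theorem pv_splitOnMax_go_zero (fuel : Nat) (l cur : List Char) (acc : List (List Char)) :
    PySem.Chars.splitOnMax.go ['#'] fuel 0 l cur acc = ((cur.reverse ++ l) :: acc).reverse := by
  cases fuel with
  | zero => simp [PySem.Chars.splitOnMax.go]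
  | succ n =>
    cases l with
    | nil => simp [PySem.Chars.splitOnMax.go]
    | cons c rest => simp [PySem.Chars.splitOnMax.go]

theorem pv_splitOnMax_go_one (fuel : Nat) :
    ∀ (l cur : List Char) (acc : List (List Char)), l.length < fuel →
      PySem.Chars.splitOnMax.go ['#'] fuel 1 l cur acc =
        acc.reverse ++ [cur.reverse ++ l.takeWhile (· ≠ '#')] ++ pvRest l := by
  induction fuel with
  | zero => intro l cur acc h; omega
  | succ n ih =>
    intro l cur acc h
    cases l with
    | nil => simp [PySem.Chars.splitOnMax.go, pvRest]
    | cons c rest =>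
      by_cases hc : c = '#'
      · subst hc
        rw [show PySem.Chars.splitOnMax.go ['#'] (n+1) 1 ('#'::rest) cur acc
            = PySem.Chars.splitOnMax.go ['#'] n 0 (List.drop 1 ('#'::rest)) [] (cur.reverse :: acc) from by
          simp [PySem.Chars.splitOnMax.go, List.isPrefixOf]]
        rw [pv_splitOnMax_go_zero]
        simp [pvRest]
      · rw [show PySem.Chars.splitOnMax.go ['#'] (n+1) 1 (c::rest) cur acc
            = PySem.Chars.splitOnMax.go ['#'] n 1 rest (c :: cur) acc from by
          have : (['#'].isPrefixOf (c :: rest)) = false := by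
            simp [List.isPrefixOf, Ne.symm hc]
          simp [PySem.Chars.splitOnMax.go, this]]
        rw [ih _ _ _ (by simpa using Nat.lt_of_succ_lt_succ h)]
        simp [pvRest, hc, Ne.symm hc]

theorem pv_splitOnMax_hash_one (l : List Char) :
    PySem.Chars.splitOnMax l ['#'] 1 = [l.takeWhile (· ≠ '#')] ++ pvRest l := by
  rw [PySem.Chars.splitOnMax]
  rw [if_neg (by omega)]
  rw [show (1 : Int).toNat = 1 from rfl]
  rw [pv_splitOnMax_go_one _ _ _ _ (by omega)]
  simp

def pvTokensOf (line : String) : List String :=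
  (((PySem.Str.split? line ",").getD []).filter (fun t => PySem.Str.strip t ≠ "")).map
    (fun t => PySem.Str.upper (PySem.Str.strip t))

theorem pv_ofList_eq_empty_iff (y : List Char) : String.ofList y = "" ↔ y = [] := by
  constructor
  · intro h; have := congrArg String.toList h; simpa using this
  · intro h; subst h; rfl

theorem pv_tokensOf_eq (s : String) : pvTokensOf s = pvT s.toList := by
  have hsplit : (PySem.Str.split? s ",").getD [] = (pvSplitC [] s.toList).map String.ofList := by
    simp [PySem.Str.split?, PySem.Chars.split?, pv_splitOn_comma]
  rw [pvTokensOf, hsplit, pvT, pvT', List.filter_map, List.filter_map, List.map_map, List.map_map]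
  have hpred : ∀ x : List Char,
      ((fun t => decide (PySem.Str.strip t ≠ "")) ∘ String.ofList) x
        = ((fun t => decide (t ≠ [])) ∘ pvF) x := by
    intro x
    simp only [Function.comp_apply, decide_eq_decide, pvF]
    rw [show PySem.Str.strip (String.ofList x) = String.ofList (PySem.Chars.strip x) from by
      simp [PySem.Str.strip]]
    rw [ne_eq, pv_ofList_eq_empty_iff, ne_eq, PySem.Chars.upper, List.map_eq_nil_iff]
  rw [List.filter_congr (fun x _ => hpred x)]
  apply List.map_congr_left
  intro x hx
  simp only [Function.comp_apply]
  simp [PySem.Str.upper, PySem.Str.strip, pvF]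

-- A's per-line result, written as a function (mirrors pvLineStepA's branches)
def pvLineTokens (raw : String) : List String :=
  let line := PySem.Str.strip raw
  if line = "" || PySem.Str.startswith line "#" then []
  else if PySem.Str.isIn "#" line then
    let line2 := PySem.Str.strip (((PySem.Str.splitMax? line "#" 1).getD []).headD "")
    if line2 = "" then [] else pvTokensOf line2
  else pvTokensOf line

theorem pv_takeWhile_ws (w : List Char) (hw : w.all PySem.Chars.isspace) :
    w.takeWhile (· ≠ '#') = w := by
  rw [List.takeWhile_eq_self_iff]
  intro x hx
  simpa using pv_ws_ne_hash (List.all_eq_true.mp hw x hx)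

theorem pv_T_ws (w : List Char) (hw : w.all PySem.Chars.isspace) : pvT w = [] := by
  rw [pvT, pv_splitC_no_comma (fun c hc => pv_ws_ne_comma (List.all_eq_true.mp hw c hc)), pvT']
  simp [pvF, pv_strip_ws hw, PySem.Chars.upper]

theorem pv_takeWhile_decomp {w1 m w2 : List Char} (hw1 : w1.all PySem.Chars.isspace)
    (hm : '#' ∈ m) :
    (w1 ++ m ++ w2).takeWhile (· ≠ '#') = w1 ++ m.takeWhile (· ≠ '#') := by
  rw [List.append_assoc, List.takeWhile_append,
      if_pos (by rw [pv_takeWhile_ws w1 hw1]), List.takeWhile_append]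
  rw [if_neg]
  intro hlen
  have : m.takeWhile (· ≠ '#') = m :=
    List.IsPrefix.eq_of_length (List.takeWhile_prefix _) hlen
  have := List.takeWhile_eq_self_iff.mp this '#' hm
  simp at this

theorem pv_lineTokens_canon (raw : String) : pvLineTokens raw = pvCanon raw := by
  obtain ⟨w1, w2, hd, hw1, hw2, -, -⟩ := pv_decomp raw.toList
  simp only [pvLineTokens, pvCanon]
  have hline : (PySem.Str.strip raw).toList = PySem.Chars.strip raw.toList := by
    simp [PySem.Str.strip]
  by_cases h0 : PySem.Chars.strip raw.toList = []
  · -- all-whitespace line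
    have hall : raw.toList.all PySem.Chars.isspace := by
      rw [List.all_eq_true]
      intro x hx
      conv at hx => rw [hd, h0]
      simp only [List.append_nil, List.mem_append] at hx
      rcases hx with h | h
      · exact List.all_eq_true.mp hw1 x h
      · exact List.all_eq_true.mp hw2 x h
    have hs0 : PySem.Str.strip raw = "" := by
      rw [← String.ofList_toList (s := PySem.Str.strip raw), hline, h0]
    rw [if_pos (by simp [hs0])]
    rw [pv_takeWhile_ws _ hall, pv_T_ws _ hall]
  · have hne : ¬ PySem.Str.strip raw = "" := by
      intro h; apply h0; rw [← hline, h]; rfl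
    by_cases hsw : PySem.Str.startswith (PySem.Str.strip raw) "#"
    · -- full-line comment
      obtain ⟨u, hu⟩ : ∃ u, PySem.Chars.strip raw.toList = '#' :: u := by
        rw [show PySem.Str.startswith (PySem.Str.strip raw) "#"
            = PySem.Chars.startswith (PySem.Chars.strip raw.toList) ['#'] from by
          simp [PySem.Str.startswith, hline]] at hsw
        cases hst : PySem.Chars.strip raw.toList with
        | nil => rw [hst] at hsw; simp [PySem.Chars.startswith, List.isPrefixOf] at hsw
        | cons c u =>
          rw [hst] at hsw
          simp [PySem.Chars.startswith, List.isPrefixOf] at hsw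
          exact ⟨u, by rw [← hsw]⟩
      have hsw' : PySem.Chars.startswith (PySem.Chars.strip raw.toList) ['#'] = true := by
        rw [← hline]; simpa [PySem.Str.startswith] using hsw
      rw [if_pos (show (decide (PySem.Str.strip raw = "")
          || PySem.Str.startswith (PySem.Str.strip raw) "#") = true by simp [hsw'])]
      conv_rhs => rw [hd, hu]
      rw [show (w1 ++ ('#' :: u) ++ w2).takeWhile (· ≠ '#') = w1 ++ ('#' :: u).takeWhile (· ≠ '#') from
        pv_takeWhile_decomp hw1 (by simp)]
      simp only [List.takeWhile_cons]
      norm_num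
      rw [pv_T_ws _ hw1]
    · have hsw' : PySem.Chars.startswith (PySem.Chars.strip raw.toList) ['#'] = false := by
        rw [← hline]
        exact Bool.eq_false_iff.mpr (fun h => hsw (by simpa [PySem.Str.startswith] using h))
      rw [if_neg (show ¬ (decide (PySem.Str.strip raw = "")
          || PySem.Str.startswith (PySem.Str.strip raw) "#") = true by simp [hne, hsw'])]
      by_cases hin : PySem.Str.isIn "#" (PySem.Str.strip raw)
      · -- inline comment
        have hmem : '#' ∈ PySem.Chars.strip raw.toList := by
          rw [show PySem.Str.isIn "#" (PySem.Str.strip raw)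
              = PySem.Chars.isIn ['#'] (PySem.Chars.strip raw.toList) from by
            simp [PySem.Str.isIn, hline]] at hin
          exact (List.singleton_infix_iff _ _).mp ((PySem.Chars.isIn_iff_infix _ _).mp hin)
        rw [if_pos hin]
        -- identify line2
        have hsplit : ((PySem.Str.splitMax? (PySem.Str.strip raw) "#" 1).getD []).headD ""
            = String.ofList ((PySem.Chars.strip raw.toList).takeWhile (· ≠ '#')) := by
          simp only [PySem.Str.splitMax?, hline, show ("#" : String).toList = ['#'] from rfl,
            PySem.Chars.splitMax?]
          rw [if_neg (by simp)]
          rw [pv_splitOnMax_hash_one]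
          simp
        set X := (PySem.Chars.strip raw.toList).takeWhile (· ≠ '#') with hX
        have hline2 : PySem.Str.strip (((PySem.Str.splitMax? (PySem.Str.strip raw) "#" 1).getD []).headD "")
            = String.ofList (PySem.Chars.strip X) := by
          rw [hsplit]; simp [PySem.Str.strip]
        have hcanon : pvT (raw.toList.takeWhile (· ≠ '#')) = pvT X := by
          conv_lhs => rw [hd]
          rw [pv_takeWhile_decomp hw1 hmem, pv_T_ws_append hw1]
        by_cases h2 : PySem.Chars.strip X = []
        · rw [if_pos (by rw [hline2, h2])]
          rw [hcanon, ← pv_T_strip X, h2]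
          have : ([] : List Char).all PySem.Chars.isspace := by simp
          rw [pv_T_ws _ this]
        · rw [if_neg (by rw [hline2]; intro h; exact h2 (by
            have := congrArg String.toList h; simpa using this))]
          rw [pv_tokensOf_eq, hline2, String.toList_ofList, pv_T_strip, hcanon]
      · -- no '#' anywhere
        rw [if_neg hin, pv_tokensOf_eq, hline, pv_T_strip]
        have hnm : '#' ∉ raw.toList := by
          rw [← pv_mem_hash_strip]
          rw [show PySem.Str.isIn "#" (PySem.Str.strip raw)
              = PySem.Chars.isIn ['#'] (PySem.Chars.strip raw.toList) from by
            simp [PySem.Str.isIn, hline]] at hin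
          intro hmem
          exact ((PySem.Chars.isIn_eq_false_iff _ _).mp (by simpa using hin))
            ((List.singleton_infix_iff _ _).mpr hmem)
        rw [List.takeWhile_eq_self_iff.mpr (fun x hx => by
          simp only [decide_eq_true_eq]
          rintro rfl
          exact hnm hx)]

-- ---- A's fold = dedup of flatMap pvLineTokens (seen-set elimination) ----

def pvAddTok (s : PySem.Set String) (t : String) : PySem.Set String :=
  if t = "" then s else PySem.Set.add s (PySem.Str.upper t)

theorem pvInner1 (xs : List String) (s : List String) :
    xs.foldl pvTokStepA (s, s) = (xs.foldl pvAddTok s, xs.foldl pvAddTok s) := by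
  induction xs generalizing s with
  | nil => rfl
  | cons x xs ih =>
    simp only [List.foldl_cons, pvTokStepA, pvAddTok]
    split_ifs with h1 h2
    · exact ih s
    · rw [show PySem.Set.add s (PySem.Str.upper x) = s by
        simp [PySem.Set.add, (Iff.mp (PySem.Set.contains_iff _ _) h2)]]
      exact ih s
    · have hm : PySem.Str.upper x ∉ s := fun h => h2 (Iff.mpr (PySem.Set.contains_iff _ _) h)
      rw [show PySem.Set.add s (PySem.Str.upper x) = s ++ [PySem.Str.upper x] by
        simp [PySem.Set.add, hm]]
      exact ih (s ++ [PySem.Str.upper x])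

theorem pvInner2 (xs : List String) (s : List String) :
    xs.foldl pvAddTok s
      = ((xs.filter (fun t => t ≠ "")).map PySem.Str.upper).foldl PySem.Set.add s := by
  induction xs generalizing s with
  | nil => rfl
  | cons x xs ih =>
    by_cases hx : x = "" <;>
      simp [hx, pvAddTok, ih]

theorem pvInnerTokens (line : String) (s : List String) :
    (((PySem.Str.split? line ",").getD []).map PySem.Str.strip).foldl pvTokStepA (s, s)
      = ((pvTokensOf line).foldl PySem.Set.add s, (pvTokensOf line).foldl PySem.Set.add s) := by
  rw [pvInner1, pvInner2]
  have h : ((((PySem.Str.split? line ",").getD []).map PySem.Str.strip).filter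
        (fun t => t ≠ "")).map PySem.Str.upper = pvTokensOf line := by
    simp [pvTokensOf, List.filter_map, Function.comp_def]
  rw [h]

theorem pvLineStep (raw : String) (s : List String) :
    pvLineStepA (s, s) raw
      = ((pvLineTokens raw).foldl PySem.Set.add s, (pvLineTokens raw).foldl PySem.Set.add s) := by
  simp only [pvLineStepA, pvLineTokens]
  split_ifs with h1 h2 h3 h4 h4' <;>
    simp_all [pvInnerTokens]

theorem pvMain (lines : List String) (s : List String) :
    lines.foldl pvLineStepA (s, s)
      = ((lines.flatMap pvLineTokens).foldl PySem.Set.add s,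
         (lines.flatMap pvLineTokens).foldl PySem.Set.add s) := by
  induction lines generalizing s with
  | nil => rfl
  | cons raw rest ih =>
    rw [List.foldl_cons, pvLineStep raw s]
    simpa [List.foldl_append] using ih ((pvLineTokens raw).foldl PySem.Set.add s)

-- ---- B's scanner = pvCanon ----

theorem pv_T'_congr {p1 p2 : List (List Char)} (h : p1.map pvF = p2.map pvF) :
    pvT' p1 = pvT' p2 := by
  simp only [pvT', h]

theorem pv_T'_cons (p : List Char) (L : List (List Char)) :
    pvT' (p :: L) = (if pvF p = [] then [] else [String.ofList (pvF p)]) ++ pvT' L := by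
  by_cases h : pvF p = [] <;> simp [pvT', h]

-- the flush of Source B's buffer equals the canonical value of the trailing piece
theorem pv_flush {q w : List Char} (hw : w.all PySem.Chars.isspace)
    (hl : PySem.Chars.lstrip q = q) (hr : PySem.Chars.rstrip q = q) (toks : List String) :
    (if PySem.Chars.upper q = [] then toks else toks ++ [String.ofList (PySem.Chars.upper q)])
      = toks ++ pvT' [q ++ w] := by
  have hstrip : PySem.Chars.strip (q ++ w) = q := by
    rw [pv_strip_append_ws hw]
    show PySem.Chars.rstrip (PySem.Chars.lstrip q) = q
    rw [hl, hr]
  have hf : pvF (q ++ w) = PySem.Chars.upper q := by rw [pvF, hstrip]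
  rw [show pvT' [q ++ w] = (if pvF (q ++ w) = [] then [] else [String.ofList (pvF (q ++ w))]) ++ pvT' [] from
    pv_T'_cons _ _, hf]
  by_cases h : PySem.Chars.upper q = [] <;> simp [h, pvT']

theorem pv_rstrip_append_nonws {c : Char} (hc : ¬ PySem.Chars.isspace c = true) (x : List Char) :
    PySem.Chars.rstrip (x ++ [c]) = x ++ [c] := by
  simp only [PySem.Chars.rstrip, List.reverse_append, List.reverse_cons, List.reverse_nil,
    List.nil_append, List.cons_append, List.dropWhile_cons]
  simp [hc]

theorem pv_scan_spec (cs : List Char) :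
    ∀ (q w : List Char) (toks : List String), w.all PySem.Chars.isspace →
      PySem.Chars.lstrip q = q → PySem.Chars.rstrip q = q → (q = [] → w = []) →
      pvScanB cs (PySem.Chars.upper q) w toks
        = toks ++ pvT' (pvSplitC (q ++ w) (cs.takeWhile (· ≠ '#'))) := by
  induction cs with
  | nil =>
    intro q w toks hw hl hr hq
    show (if PySem.Chars.upper q = [] then toks else toks ++ [String.ofList (PySem.Chars.upper q)])
      = _
    rw [pv_flush hw hl hr]
    simp [pvSplitC]
  | cons c rest ih =>
    intro q w toks hw hl hr hq
    by_cases hc1 : c = '#'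
    · subst hc1
      show (if '#' = '#' then _ else _) = _
      rw [if_pos rfl]
      rw [show ('#' :: rest).takeWhile (· ≠ '#') = [] from by simp]
      rw [show pvSplitC (q ++ w) [] = [q ++ w] from rfl]
      exact pv_flush hw hl hr toks
    · by_cases hc2 : c = ','
      · subst hc2
        show (if (',' : Char) = '#' then _ else if (',' : Char) = ',' then
            pvScanB rest [] []
              (if PySem.Chars.upper q = [] then toks else toks ++ [String.ofList (PySem.Chars.upper q)])
          else _) = _
        rw [if_neg hc1, if_pos rfl]
        rw [show ((',' : Char) :: rest).takeWhile (· ≠ '#') = ',' :: rest.takeWhile (· ≠ '#') from by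
          simp]
        rw [pv_splitC_comma, pv_T'_cons]
        have h0 : ([] : List Char) = PySem.Chars.upper [] := rfl
        rw [show pvScanB rest [] []
              (if PySem.Chars.upper q = [] then toks else toks ++ [String.ofList (PySem.Chars.upper q)])
            = pvScanB rest (PySem.Chars.upper []) []
              (if PySem.Chars.upper q = [] then toks else toks ++ [String.ofList (PySem.Chars.upper q)]) from rfl]
        rw [ih [] [] _ (by simp) rfl rfl (fun _ => rfl)]
        rw [pv_flush hw hl hr toks]
        have hstrip : PySem.Chars.strip (q ++ w) = q := by
          rw [pv_strip_append_ws hw]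
          show PySem.Chars.rstrip (PySem.Chars.lstrip q) = q
          rw [hl, hr]
        rw [show pvT' [q ++ w] = if pvF (q ++ w) = [] then [] else [String.ofList (pvF (q ++ w))] from by
          by_cases h : pvF (q ++ w) = [] <;> simp [pvT', h]]
        simp [List.append_assoc]
      · by_cases hc3 : PySem.Chars.isspace c
        · -- whitespace
          show (if c = '#' then _ else if c = ',' then _ else if PySem.Chars.isspace c then
              pvScanB rest (PySem.Chars.upper q)
                (if PySem.Chars.upper q = [] then w else w ++ [c]) toks
            else _) = _
          rw [if_neg hc1, if_neg hc2, if_pos hc3]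
          rw [show (c :: rest).takeWhile (· ≠ '#') = c :: rest.takeWhile (· ≠ '#') from by
            simp [hc1]]
          rw [pv_splitC_other hc2]
          by_cases hq0 : q = []
          · subst hq0
            have hw0 : w = [] := hq rfl
            subst hw0
            rw [show PySem.Chars.upper [] = ([] : List Char) from rfl, if_pos rfl]
            have key := ih [] [] toks (by simp) rfl rfl (fun _ => rfl)
            rw [show pvScanB rest ([] : List Char) ([] : List Char) toks
                = toks ++ pvT' (pvSplitC ([] ++ []) (rest.takeWhile (· ≠ '#'))) from key]
            congr 1
            apply pv_T'_congr
            have := pv_map_f_splitC_ws_pre (w := [c]) (by simp [hc3]) [] (rest.takeWhile (· ≠ '#'))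
            simpa using this.symm
          · rw [if_neg (show ¬ PySem.Chars.upper q = [] from
              fun h => hq0 (by simpa [PySem.Chars.upper, List.map_eq_nil_iff] using h))]
            rw [ih q (w ++ [c]) _ (by simp [List.all_eq_true] at hw ⊢; exact ⟨hw, hc3⟩) hl hr
              (fun h => absurd h hq0)]
            rw [← List.append_assoc]
        · -- ordinary token character
          show (if c = '#' then _ else if c = ',' then _ else if PySem.Chars.isspace c then _
            else pvScanB rest (PySem.Chars.upper q ++ w ++ [PySem.Chars.upperChar c]) [] toks) = _
          rw [if_neg hc1, if_neg hc2, if_neg hc3]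
          rw [show (c :: rest).takeWhile (· ≠ '#') = c :: rest.takeWhile (· ≠ '#') from by
            simp [hc1]]
          rw [pv_splitC_other hc2]
          have hbuf : PySem.Chars.upper q ++ w ++ [PySem.Chars.upperChar c]
              = PySem.Chars.upper (q ++ w ++ [c]) := by
            simp only [PySem.Chars.upper, List.map_append, List.map_cons, List.map_nil]
            rw [show List.map PySem.Chars.upperChar w = w from pv_upper_ws hw]
          rw [hbuf]
          have hl' : PySem.Chars.lstrip (q ++ w ++ [c]) = q ++ w ++ [c] := by
            by_cases hq0 : q = []
            · subst hq0
              rw [hq rfl]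
              show List.dropWhile _ _ = _
              simp [hc3]
            · show List.dropWhile _ _ = _
              rw [List.append_assoc, List.dropWhile_append]
              rw [show List.dropWhile PySem.Chars.isspace q = q from hl]
              simp [List.isEmpty_iff, hq0]
          have hr' : PySem.Chars.rstrip (q ++ w ++ [c]) = q ++ w ++ [c] :=
            pv_rstrip_append_nonws hc3 (q ++ w)
          rw [ih (q ++ w ++ [c]) [] _ (by simp) hl' hr' (fun h => absurd h (by simp))]
          simp

theorem pv_scan_line (cs : List Char) (toks : List String) :
    pvScanB cs [] [] toks = toks ++ pvT (cs.takeWhile (· ≠ '#')) := by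
  have := pv_scan_spec cs [] [] toks (by simp) rfl rfl (fun _ => rfl)
  simpa [pvT] using this

theorem pvMainB (lines : List String) (toks : List String) :
    lines.foldl (fun toks raw => pvScanB raw.toList [] [] toks) toks
      = toks ++ lines.flatMap pvCanon := by
  induction lines generalizing toks with
  | nil => simp
  | cons raw rest ih =>
    rw [List.foldl_cons, pv_scan_line, ih]
    simp [pvCanon]

-- ===== VERDICT (by name: the statement is the Claim_ definition above) =====
theorem parse_list_lines_py_spec : Claim_equal_parse_list_lines_py := by
  intro lines _
  unfold Spec_parse_list_lines_py parse_list_lines_py parse_list_lines_py_alt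
  rw [pvMainB, List.nil_append, PySem.List.dedup_eq_ofList, PySem.Set.ofList_eq_foldl]
  rw [show (PySem.Set.empty : PySem.Set String) = [] from rfl, pvMain lines []]
  show List.foldl PySem.Set.add [] (lines.flatMap pvLineTokens)
      = List.foldl PySem.Set.add [] (lines.flatMap pvCanon)
  congr 1
  exact List.flatMap_congr (fun raw _ => pv_lineTokens_canon raw)
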